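-- pv_equiv track=rewrite | github.com/yatbazhakan/HAR-Research | scripts/training_gui.py | _quote_command_for_shell
-- ===== SOURCE A (Python) =====
-- def _quote_command_for_shell(command_parts):
--     """Quote command arguments that contain glob patterns for shell execution"""
--     quoted_command = []
--     i = 0
--     while i < len(command_parts):
--         # Arguments that might contain glob patterns or paths with special characters
--         if (command_parts[i] in ["--shards_glob", "--fold_json", "--stats", "--plot_dir",
--                                "--class_names", "--wandb_project", "--wandb_run"] and
--             i + 1 < len(command_parts)):
--             # Quote the argument value to prevent shell expansion
--             quoted_command.append(command_parts[i])
--             quoted_command.append(f'"{command_parts[i + 1]}"')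
--             i += 2
--         else:
--             quoted_command.append(command_parts[i])
--             i += 1
--     return quoted_command
-- ===== SOURCE B (Python) =====
-- _QUOTED_FLAGS = frozenset([
--     "--shards_glob", "--fold_json", "--stats", "--plot_dir",
--     "--class_names", "--wandb_project", "--wandb_run",
-- ])
--
-- def _quote_command_for_shell(command_parts):
--     """Single pass: a boolean state says whether the current token is a flag's value."""
--     quoted_command = []
--     expecting_value = False
--     for token in command_parts:
--         if expecting_value:
--             quoted_command.append(f'"{token}"')
--             expecting_value = False
--         else:
--             quoted_command.append(token)
--             expecting_value = token in _QUOTED_FLAGS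
--     return quoted_command
-- ===== Notes on version B (the rewrite author's own statement) =====
-- stated objective: simpler
-- what changed: Replaces the index-based while loop with look-ahead and i += 2 skipping by a single for-loop over the tokens carrying one boolean 'expecting_value' state, with the flag names in a frozenset.
import Mathlib
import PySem

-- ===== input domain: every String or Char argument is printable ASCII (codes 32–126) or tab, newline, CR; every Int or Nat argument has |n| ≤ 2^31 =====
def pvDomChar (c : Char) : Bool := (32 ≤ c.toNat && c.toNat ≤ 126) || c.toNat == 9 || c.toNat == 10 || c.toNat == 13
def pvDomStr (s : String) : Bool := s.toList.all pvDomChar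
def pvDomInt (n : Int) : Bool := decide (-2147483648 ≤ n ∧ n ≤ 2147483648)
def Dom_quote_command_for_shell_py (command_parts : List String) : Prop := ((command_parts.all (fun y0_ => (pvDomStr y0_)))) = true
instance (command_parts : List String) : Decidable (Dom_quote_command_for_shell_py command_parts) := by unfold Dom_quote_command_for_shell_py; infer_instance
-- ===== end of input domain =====

-- B replaces A's index-based while loop with i+=2 look-ahead by a single pass carrying a boolean 'expecting_value' state (objective: simpler).


-- ===== PORT A =====
-- the flag-name list literal from the Python source (same literal in A and B)
def pvFlags : List String :=
  ["--shards_glob", "--fold_json", "--stats", "--plot_dir",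
   "--class_names", "--wandb_project", "--wandb_run"]

-- f'"{t}"'
def pvQuote (t : String) : String := "\"" ++ t ++ "\""

-- A's while loop over index i with look-ahead at i+1, as structural recursion on the remaining suffix:
-- 'i + 1 < len(command_parts)' = the suffix has a second element.
def quoteA_go : List String → List String
  | [] => []
  | [x] =>
      -- 'x in flags and i+1 < len' is False (no look-ahead element): else branch, i += 1
      [x]
  | x :: y :: rest =>
      if x ∈ pvFlags then
        -- append flag and quoted value, i += 2
        x :: pvQuote y :: quoteA_go rest
      else
        x :: quoteA_go (y :: rest)

def quote_command_for_shell_py (command_parts : List String) : List String :=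
  quoteA_go command_parts

-- ===== PORT B =====
-- B's single pass with boolean state 'expecting_value'
def quoteB_go : List String → Bool → List String
  | [], _ => []
  | token :: rest, expecting_value =>
      if expecting_value then
        pvQuote token :: quoteB_go rest false
      else
        token :: quoteB_go rest (token ∈ pvFlags)

def quote_command_for_shell_py_alt (command_parts : List String) : List String :=
  quoteB_go command_parts false

-- ===== PRECONDITION & SPEC =====
def Spec_quote_command_for_shell_py (command_parts : List String) (out : List String) : Prop := out = quote_command_for_shell_py_alt command_parts
instance (command_parts : List String) (out : List String) : Decidable (Spec_quote_command_for_shell_py command_parts out) := by unfold Spec_quote_command_for_shell_py; infer_instance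

-- ===== CLAIM (what is proved, stated in full; the proofs are below) =====
def Claim_equal_quote_command_for_shell_py : Prop := ∀ (command_parts : List String), Dom_quote_command_for_shell_py command_parts → Spec_quote_command_for_shell_py command_parts (quote_command_for_shell_py command_parts)

-- ===== LEMMAS AND PROOFS =====
theorem quote_go_eq : ∀ (l : List String), quoteA_go l = quoteB_go l false := by
  intro l
  induction l using quoteA_go.induct with
  | case1 => rfl
  | case2 x =>
      simp [quoteA_go, quoteB_go]
  | case3 x y rest h ih =>
      simp [quoteA_go, quoteB_go, h, ih]
  | case4 x y rest h ih =>
      simp [quoteA_go, quoteB_go, h, ih]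

-- ===== VERDICT (by name: the statement is the Claim_ definition above) =====
theorem quote_command_for_shell_py_spec : Claim_equal_quote_command_for_shell_py := by
  intro l _
  unfold Spec_quote_command_for_shell_py quote_command_for_shell_py quote_command_for_shell_py_alt
  exact quote_go_eq l
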